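-- pv_equiv track=rewrite | github.com/katearb/2020-2-level-labs | lab_1/main.py | get_concordance
-- ===== SOURCE A (Python) =====
-- def get_concordance(tokens: list, word: str, left_context_size: int, right_context_size: int) -> list:
--     """
--     Gets a concordance of a word
--     A concordance is a listing of each occurrence of a word in a text,
--     presented with the words surrounding it
--     :param tokens: a list of tokens
--     :param word: a word-base for a concordance
--     :param left_context_size: the number of words in the left context
--     :param right_context_size: the number of words in the right context
--     :return: a concordance
--     e.g. tokens = ['the', 'weather', 'is', 'sunny', 'the', 'man', 'is', 'happy',
--                     'the', 'dog', 'is', 'happy', 'but', 'the', 'cat', 'is', 'sad']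
--     word = 'happy'
--     left_context_size = 2
--     right_context_size = 3
--     --> [['man', 'is', 'happy', 'the', 'dog', 'is'], ['dog', 'is', 'happy', 'but', 'the', 'cat']]
--     """
--     if isinstance(right_context_size, bool) and isinstance(left_context_size, bool):
--         return []
--
--     if isinstance(tokens, list) and isinstance(word, str) and isinstance(right_context_size, int) and isinstance(
--             left_context_size, int):
--         tokens_copy = tokens.copy()
--         inds = []
--
--         count = 0
--         while word in tokens_copy:
--             inds.append(tokens_copy.index(word) + count)
--             tokens_copy.remove(word)
--             count += 1
--
--         if left_context_size > 0 and right_context_size > 0: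
--             return [tokens[i - left_context_size:i + right_context_size + 1] for i in inds]
--         elif left_context_size > 0:
--             return [tokens[i - left_context_size:i + 1] for i in inds]
--         elif right_context_size > 0:
--             return [tokens[i:i + int(right_context_size) + 1] for i in inds]
--
--         return []
--
--     return []
-- ===== SOURCE B (Python) =====
-- def get_concordance(tokens: list, word: str, left_context_size: int, right_context_size: int) -> list:
--     if isinstance(right_context_size, bool) and isinstance(left_context_size, bool):
--         return []
--     if not (isinstance(tokens, list) and isinstance(word, str)
--             and isinstance(right_context_size, int) and isinstance(left_context_size, int)):
--         return []
--     result = []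
--     for i, tok in enumerate(tokens):
--         if tok == word:
--             if left_context_size > 0 and right_context_size > 0:
--                 result.append(tokens[i - left_context_size:i + right_context_size + 1])
--             elif left_context_size > 0:
--                 result.append(tokens[i - left_context_size:i + 1])
--             elif right_context_size > 0:
--                 result.append(tokens[i:i + right_context_size + 1])
--     return result
-- ===== Notes on version B (the rewrite author's own statement) =====
-- stated objective: simpler
-- what changed: A collects occurrence indices with a repeated index()/remove() loop over a shrinking copy and then slices in a second comprehension pass; B is one enumerate pass that slices at each occurrence directly, with no copy, no index list and no second pass.
import Mathlib
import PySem

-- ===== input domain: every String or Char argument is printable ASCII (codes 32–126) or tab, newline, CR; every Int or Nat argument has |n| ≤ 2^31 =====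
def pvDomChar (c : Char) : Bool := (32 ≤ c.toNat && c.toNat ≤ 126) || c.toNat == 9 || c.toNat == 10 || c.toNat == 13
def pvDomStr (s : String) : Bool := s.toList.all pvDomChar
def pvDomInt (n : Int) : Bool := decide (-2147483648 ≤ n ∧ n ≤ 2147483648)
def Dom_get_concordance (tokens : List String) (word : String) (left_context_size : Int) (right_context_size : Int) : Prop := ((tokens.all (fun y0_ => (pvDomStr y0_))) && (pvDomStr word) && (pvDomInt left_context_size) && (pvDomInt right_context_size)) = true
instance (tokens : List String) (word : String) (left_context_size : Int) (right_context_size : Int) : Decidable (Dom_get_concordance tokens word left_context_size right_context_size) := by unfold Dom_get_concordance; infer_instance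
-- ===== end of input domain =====

-- B fuses A's two stages (collect occurrence indices by repeated index/remove on a shrinking copy,
-- then slice in a second comprehension) into one enumerate pass that slices at each occurrence
-- directly; objective: simpler (same measured cost).

-- ===== PORT A =====
-- the while loop: while word in tokens_copy: inds.append(tokens_copy.index(word)+count); tokens_copy.remove(word); count += 1
def gcA_loop (tokens_copy : List String) (word : String) (count : Int) (inds : List Int) : List Int :=
  if h : word ∈ tokens_copy then
    match PySem.List.index? tokens_copy word, h2 : PySem.List.remove? tokens_copy word with
    | some idx, some rest => gcA_loop rest word (count + 1) (inds ++ [(idx : Int) + count])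
    | _, _ => inds
  else inds
termination_by tokens_copy.length
decreasing_by
  rw [PySem.List.remove?_eq_some_erase _ _ h] at h2
  cases h2
  have : 0 < tokens_copy.length := List.length_pos_of_mem h
  simp only [List.length_erase_of_mem h]
  omega

def get_concordance (tokens : List String) (word : String) (left_context_size : Int) (right_context_size : Int) : List (List String) :=
  let inds := gcA_loop tokens word 0 []
  if left_context_size > 0 ∧ right_context_size > 0 then
    inds.map (fun i => PySem.List.slice tokens (some (i - left_context_size)) (some (i + right_context_size + 1)))
  else if left_context_size > 0 then
    inds.map (fun i => PySem.List.slice tokens (some (i - left_context_size)) (some (i + 1)))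
  else if right_context_size > 0 then
    inds.map (fun i => PySem.List.slice tokens (some i) (some (i + right_context_size + 1)))
  else []

-- ===== PORT B =====
def get_concordance_alt (tokens : List String) (word : String) (left_context_size : Int) (right_context_size : Int) : List (List String) :=
  (PySem.List.enumerate tokens 0).foldl (fun result p =>
    if p.2 == word then
      if left_context_size > 0 && right_context_size > 0 then
        result ++ [PySem.List.slice tokens (some (p.1 - left_context_size)) (some (p.1 + right_context_size + 1))]
      else if left_context_size > 0 then
        result ++ [PySem.List.slice tokens (some (p.1 - left_context_size)) (some (p.1 + 1))]
      else if right_context_size > 0 then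
        result ++ [PySem.List.slice tokens (some p.1) (some (p.1 + right_context_size + 1))]
      else result
    else result) []

-- ===== PRECONDITION & SPEC =====
def Spec_get_concordance (tokens : List String) (word : String) (left_context_size : Int) (right_context_size : Int) (out : List (List String)) : Prop := out = get_concordance_alt tokens word left_context_size right_context_size
instance (tokens : List String) (word : String) (left_context_size : Int) (right_context_size : Int) (out : List (List String)) : Decidable (Spec_get_concordance tokens word left_context_size right_context_size out) := by unfold Spec_get_concordance; infer_instance

-- ===== CLAIM (what is proved, stated in full; the proofs are below) =====
def Claim_equal_get_concordance : Prop := ∀ (tokens : List String) (word : String) (left_context_size : Int) (right_context_size : Int), Dom_get_concordance tokens word left_context_size right_context_size → Spec_get_concordance tokens word left_context_size right_context_size (get_concordance tokens word left_context_size right_context_size)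

-- ===== LEMMAS AND PROOFS =====

-- the (Int) positions of the occurrences of w in xs, offset by c
def occFrom (xs : List String) (w : String) (c : Int) : List Int :=
  match xs with
  | [] => []
  | x :: t => if x = w then c :: occFrom t w (c + 1) else occFrom t w (c + 1)

lemma occFrom_not_mem {xs : List String} {w : String} (h : w ∉ xs) (c : Int) :
    occFrom xs w c = [] := by
  induction xs generalizing c with
  | nil => rfl
  | cons x t ih =>
    simp at h
    simp [occFrom, Ne.symm h.1, ih h.2]

lemma occFrom_append_not_mem {a : List String} {w : String} (h : w ∉ a)
    (ys : List String) (c : Int) :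
    occFrom (a ++ ys) w c = occFrom ys w (c + a.length) := by
  induction a generalizing c with
  | nil => simp
  | cons x t ih =>
    simp at h
    simp [occFrom, Ne.symm h.1, ih h.2]
    rw [show c + (↑t.length + 1) = (c + 1) + ↑t.length by ring]

lemma gcA_loop_eq (xs : List String) (w : String) (c : Int) (inds : List Int) :
    gcA_loop xs w c inds = inds ++ occFrom xs w c := by
  induction hn : xs.length using Nat.strong_induction_on generalizing xs c inds with
  | _ n ih =>
  rw [gcA_loop]
  by_cases h : w ∈ xs
  · obtain ⟨k, hk⟩ := Option.isSome_iff_exists.1 ((PySem.List.index?_isSome_iff xs w).2 h)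
    obtain ⟨pre, suf, hdec, hlen, hpre⟩ := (PySem.List.index?_eq_some_iff xs w k).1 hk
    have hrem : PySem.List.remove? xs w = some (pre ++ suf) := by
      rw [PySem.List.remove?_eq_some_erase _ _ h, hdec,
        List.erase_append_right _ (by simpa using hpre)]
      simp
    rw [dif_pos h]
    split
    case _ idx rest h1 h2 =>
      rw [hk] at h1
      rw [hrem] at h2
      cases h1; cases h2
      have hlt : (pre ++ suf).length < n := by
        subst hdec hn; simp
      rw [ih _ hlt _ _ _ rfl]
      subst hdec hlen
      rw [occFrom_append_not_mem hpre, occFrom_append_not_mem hpre]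
      simp [occFrom]
      constructor
      · omega
      · congr 1; omega
    case _ hno =>
      exact absurd hrem (by simpa using hno k (pre ++ suf) hk)
  · rw [dif_neg h, occFrom_not_mem h, List.append_nil]

lemma foldB_both (tokens : List String) (w : String) (l r : Int) (xs : List String)
    (s : Int) (acc : List (List String)) :
    (PySem.List.enumerate xs s).foldl (fun result p =>
      if p.2 == w then
        result ++ [PySem.List.slice tokens (some (p.1 - l)) (some (p.1 + r + 1))]
      else result) acc
    = acc ++ (occFrom xs w s).map
        (fun i => PySem.List.slice tokens (some (i - l)) (some (i + r + 1))) := by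
  induction xs generalizing s acc with
  | nil => simp [PySem.List.enumerate_nil, occFrom]
  | cons x t ih =>
    rw [PySem.List.enumerate_cons, List.foldl_cons]
    by_cases hx : x = w
    · rw [if_pos (by simpa using hx), ih]
      simp [occFrom, hx]
    · rw [if_neg (by simpa using hx), ih]
      simp [occFrom, hx]

lemma foldB_left (tokens : List String) (w : String) (l : Int) (xs : List String)
    (s : Int) (acc : List (List String)) :
    (PySem.List.enumerate xs s).foldl (fun result p =>
      if p.2 == w then
        result ++ [PySem.List.slice tokens (some (p.1 - l)) (some (p.1 + 1))]
      else result) acc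
    = acc ++ (occFrom xs w s).map
        (fun i => PySem.List.slice tokens (some (i - l)) (some (i + 1))) := by
  induction xs generalizing s acc with
  | nil => simp [PySem.List.enumerate_nil, occFrom]
  | cons x t ih =>
    rw [PySem.List.enumerate_cons, List.foldl_cons]
    by_cases hx : x = w
    · rw [if_pos (by simpa using hx), ih]
      simp [occFrom, hx]
    · rw [if_neg (by simpa using hx), ih]
      simp [occFrom, hx]

lemma foldB_right (tokens : List String) (w : String) (r : Int) (xs : List String)
    (s : Int) (acc : List (List String)) :
    (PySem.List.enumerate xs s).foldl (fun result p =>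
      if p.2 == w then
        result ++ [PySem.List.slice tokens (some p.1) (some (p.1 + r + 1))]
      else result) acc
    = acc ++ (occFrom xs w s).map
        (fun i => PySem.List.slice tokens (some i) (some (i + r + 1))) := by
  induction xs generalizing s acc with
  | nil => simp [PySem.List.enumerate_nil, occFrom]
  | cons x t ih =>
    rw [PySem.List.enumerate_cons, List.foldl_cons]
    by_cases hx : x = w
    · rw [if_pos (by simpa using hx), ih]
      simp [occFrom, hx]
    · rw [if_neg (by simpa using hx), ih]
      simp [occFrom, hx]

lemma foldl_keep (l : List (Int × String)) (acc : List (List String)) :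
    l.foldl (fun (result : List (List String)) (_ : Int × String) => result) acc = acc := by
  induction l generalizing acc with
  | nil => rfl
  | cons x t ih => simp [ih]

-- ===== VERDICT (by name: the statement is the Claim_ definition above) =====
theorem get_concordance_spec : Claim_equal_get_concordance := by
  intro tokens word l r _
  unfold Spec_get_concordance get_concordance get_concordance_alt
  rw [gcA_loop_eq]
  by_cases hl : l > 0 <;> by_cases hr : r > 0
  · simp only [hl, hr, and_self, decide_true, Bool.and_self, if_true]
    rw [foldB_both]
    simp
  · simp only [hl, hr, and_false, decide_true, decide_false, Bool.and_false,
      Bool.false_eq_true, if_false, if_true]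
    rw [foldB_left]
    simp
  · simp only [hl, hr, false_and, decide_true, decide_false, Bool.false_and,
      Bool.false_eq_true, if_false, if_true]
    rw [foldB_right]
    simp
  · simp only [hl, hr, false_and, decide_false, Bool.false_and,
      Bool.false_eq_true, if_false, ite_self]
    rw [foldl_keep]
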